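-- pv_equiv track=rewrite | github.com/tuttle-dev/tuttle | tuttle_ui/projects/views/project_editor.py | get_id_from_dropdown_selection
-- ===== SOURCE A (Python) =====
-- def get_id_from_dropdown_selection(selected: str):
--     id = ""
--     for c in selected:
--         if c == "#":
--             continue
--         if c == " ":
--             break
--         id = id + c
--     return id
-- ===== SOURCE B (Python) =====
-- def get_id_from_dropdown_selection(selected: str):
--     return selected.split(" ", 1)[0].replace("#", "")
-- ===== Notes on version B (the rewrite author's own statement) =====
-- stated objective: faster
-- what changed: Replaces the fused per-character accumulator loop, which skips hash characters and breaks at the first space while rebuilding the id string by repeated concatenation, with two staged library string passes: take the prefix before the first space via split on a single space with maxsplit 1, then delete hashes with replace.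
import Mathlib
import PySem

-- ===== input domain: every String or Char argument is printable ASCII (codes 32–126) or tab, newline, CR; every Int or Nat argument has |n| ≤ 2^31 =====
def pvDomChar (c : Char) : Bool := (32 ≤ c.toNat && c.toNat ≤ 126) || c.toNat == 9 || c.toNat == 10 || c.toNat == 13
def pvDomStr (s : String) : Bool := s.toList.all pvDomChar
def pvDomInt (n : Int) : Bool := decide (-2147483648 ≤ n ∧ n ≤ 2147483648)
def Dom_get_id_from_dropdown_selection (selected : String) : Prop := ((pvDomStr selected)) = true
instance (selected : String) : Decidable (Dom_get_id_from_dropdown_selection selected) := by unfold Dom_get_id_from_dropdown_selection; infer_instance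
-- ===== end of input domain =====

-- B replaces the fused accumulator loop by two staged string passes (prefix before first space, then drop '#'): idiomatic, same cost.

-- ===== PORT A =====
-- A's for-loop with break: structural recursion over the characters, carrying the growing id.
def pvGoA (id : List Char) : List Char → List Char
  | [] => id
  | c :: cs =>
    if c = '#' then pvGoA id cs
    else if c = ' ' then id
    else pvGoA (id ++ [c]) cs

def get_id_from_dropdown_selection (selected : String) : String :=
  String.mk (pvGoA [] selected.toList)

-- ===== PORT B =====
-- Source B: selected.split(" ", 1)[0] = prefix before the first space; .replace("#", "") = filter out '#'.
def get_id_from_dropdown_selection_alt (selected : String) : String :=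
  String.mk (((selected.toList.takeWhile (· ≠ ' ')).filter (· ≠ '#')))

-- ===== PRECONDITION & SPEC =====
def Spec_get_id_from_dropdown_selection (selected : String) (out : String) : Prop := out = get_id_from_dropdown_selection_alt selected
instance (selected : String) (out : String) : Decidable (Spec_get_id_from_dropdown_selection selected out) := by unfold Spec_get_id_from_dropdown_selection; infer_instance

-- ===== CLAIM (what is proved, stated in full; the proofs are below) =====
def Claim_equal_get_id_from_dropdown_selection : Prop := ∀ (selected : String), Dom_get_id_from_dropdown_selection selected → Spec_get_id_from_dropdown_selection selected (get_id_from_dropdown_selection selected)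

-- ===== LEMMAS AND PROOFS =====
theorem pvGoA_eq (l : List Char) : ∀ (id : List Char),
    pvGoA id l = id ++ ((l.takeWhile (· ≠ ' ')).filter (· ≠ '#')) := by
  induction l with
  | nil => intro id; simp [pvGoA]
  | cons c cs ih =>
    intro id
    by_cases h : c = '#'
    · subst h; simp [pvGoA, List.takeWhile, ih]
    · by_cases hs : c = ' '
      · subst hs; simp [pvGoA, List.takeWhile]
      · simp [pvGoA, h, hs, List.takeWhile, ih]

-- ===== VERDICT (by name: the statement is the Claim_ definition above) =====
theorem get_id_from_dropdown_selection_spec : Claim_equal_get_id_from_dropdown_selection := by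
  intro selected _
  unfold Spec_get_id_from_dropdown_selection get_id_from_dropdown_selection get_id_from_dropdown_selection_alt
  rw [pvGoA_eq]
  simp
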